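-- pv_equiv track=rewrite | github.com/roshankraveendrababu/coding-files | sixphrase_adsa_class_hw/day4adsa.py | push10_multiples
-- ===== SOURCE A (Python) =====
-- def push10_multiples(arr):
--     n=len(arr)
--     index_10=n-1
--     for i in range(n-1,-1,-1):
--         if arr[i]%10==0:
--             temp=arr[i]
--             for j in range(i,index_10):
--                 arr[j]=arr[j+1]
--             arr[index_10]=temp
--             index_10-=1
--     return arr
-- ===== SOURCE B (Python) =====
-- def push10_multiples(arr):
--     # Single pass stable partition: non-multiples of 10 in order, then multiples in order.
--     # (A mutates arr in place; B builds a new list — return value is identical.)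
--     rest = []
--     tens = []
--     for x in arr:
--         if x % 10 == 0:
--             tens.append(x)
--         else:
--             rest.append(x)
--     return rest + tens
-- ===== Notes on version B (the rewrite author's own statement) =====
-- stated objective: faster
-- what changed: Replaced the quadratic in-place shift-to-end loop with a single pass that collects non-multiples and multiples of 10 into two lists and concatenates them (B does not mutate the argument; the return value is identical).
import Mathlib
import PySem

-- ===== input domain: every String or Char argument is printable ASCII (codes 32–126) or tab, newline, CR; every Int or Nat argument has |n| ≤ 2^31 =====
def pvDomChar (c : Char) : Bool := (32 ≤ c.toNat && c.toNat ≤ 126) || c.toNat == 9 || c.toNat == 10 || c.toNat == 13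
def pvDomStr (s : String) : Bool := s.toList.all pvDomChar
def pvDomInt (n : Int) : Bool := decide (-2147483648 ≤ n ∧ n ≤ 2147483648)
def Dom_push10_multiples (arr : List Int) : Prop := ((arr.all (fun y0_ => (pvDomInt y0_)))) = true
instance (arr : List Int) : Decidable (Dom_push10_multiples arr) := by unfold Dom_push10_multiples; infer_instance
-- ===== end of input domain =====

-- B replaces A's quadratic in-place shift loop with a linear two-list collection pass;
-- A mutates its argument in place, B does not — the equivalence proved here is about the return value only.

-- ===== PORT A =====
def push10_multiples (arr : List Int) : List Int :=
  let n : Int := (arr.length : Int)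
  ((PySem.List.pyRange (n - 1) (-1) (-1)).foldl
    (fun (st : List Int × Int) i =>
      -- indices i, j, j+1 and index_10 are always in range in A; pyGetD/pySetD are exact there
      if PySem.Int.mod (PySem.List.pyGetD st.1 i 0) 10 == 0 then
        let temp := PySem.List.pyGetD st.1 i 0
        let a' := (PySem.List.pyRange i st.2 1).foldl
          (fun a j => PySem.List.pySetD a j (PySem.List.pyGetD a (j + 1) 0)) st.1
        (PySem.List.pySetD a' st.2 temp, st.2 - 1)
      else st)
    (arr, n - 1)).1

-- ===== PORT B =====
def push10_multiples_alt (arr : List Int) : List Int :=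
  let p := arr.foldl
    (fun (st : List Int × List Int) x =>
      if PySem.Int.mod x 10 == 0 then (st.1, st.2 ++ [x]) else (st.1 ++ [x], st.2))
    ([], [])
  p.1 ++ p.2

-- ===== PRECONDITION & SPEC =====
def Spec_push10_multiples (arr : List Int) (out : List Int) : Prop := out = push10_multiples_alt arr
instance (arr : List Int) (out : List Int) : Decidable (Spec_push10_multiples arr out) := by unfold Spec_push10_multiples; infer_instance

-- ===== CLAIM (what is proved, stated in full; the proofs are below) =====
def Claim_equal_push10_multiples : Prop := ∀ (arr : List Int), Dom_push10_multiples arr → Spec_push10_multiples arr (push10_multiples arr)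

-- ===== LEMMAS AND PROOFS =====

-- getting the element right after a prefix
theorem pv_getD_append_len (P : List Int) (y : Int) (R : List Int) (d : Int) :
    (P ++ y :: R).getD P.length d = y := by
  induction P with
  | nil => rfl
  | cons p P ih => simpa using ih

-- setting the element right after a prefix
theorem pv_set_append_len (P : List Int) (y : Int) (R : List Int) (v : Int) :
    (P ++ y :: R).set P.length v = P ++ v :: R := by
  induction P with
  | nil => rfl
  | cons p P ih => simpa using ih

-- the inner shift loop of A: shifts Q one step left over the slot holding y; some junk z remains
-- at the final slot (it is overwritten right afterwards by A)
theorem pv_inner (Q : List Int) : ∀ (P : List Int) (y : Int) (R : List Int),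
    ∃ z, (PySem.List.pyRange (P.length : Int) ((P.length : Int) + (Q.length : Int)) 1).foldl
      (fun a j => PySem.List.pySetD a j (PySem.List.pyGetD a (j + 1) 0)) (P ++ y :: (Q ++ R))
      = P ++ Q ++ z :: R := by
  induction Q with
  | nil =>
    intro P y R
    refine ⟨y, ?_⟩
    rw [PySem.List.pyRange_one_eq_nil (by simp)]
    simp
  | cons q Q ih =>
    intro P y R
    rw [PySem.List.pyRange_one_cons (by simp)]
    simp only [List.foldl_cons]
    have hget : PySem.List.pyGetD (P ++ y :: (q :: Q ++ R)) ((P.length : Int) + 1) 0 = q := by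
      have h1 : ((P.length : Int) + 1) = ((P.length + 1 : Nat) : Int) := by push_cast; ring
      rw [h1, PySem.List.pyGetD_natCast]
      have := pv_getD_append_len (P ++ [y]) q (Q ++ R) 0
      simpa using this
    have hset : PySem.List.pySetD (P ++ y :: (q :: Q ++ R)) ((P.length : Int)) q
        = (P ++ [q]) ++ q :: (Q ++ R) := by
      rw [PySem.List.pySetD_natCast]
      have := pv_set_append_len P y (q :: Q ++ R) q
      simpa using this
    rw [hget, hset]
    have hrange : (PySem.List.pyRange ((P.length : Int) + 1)
          ((P.length : Int) + ((q :: Q).length : Int)) 1)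
        = PySem.List.pyRange (((P ++ [q]).length : Int))
          (((P ++ [q]).length : Int) + (Q.length : Int)) 1 := by
      congr 1 <;> simp <;> omega
    rw [hrange]
    obtain ⟨z, hz⟩ := ih (P ++ [q]) q R
    exact ⟨z, by simpa using hz⟩

-- the outer loop of A: processing the prefix `pre` (suffix already partitioned into NM ++ M)
theorem pv_outer (pre : List Int) : ∀ (NM M : List Int),
    (PySem.List.pyRange ((pre.length : Int) - 1) (-1) (-1)).foldl
      (fun (st : List Int × Int) i =>
        if PySem.Int.mod (PySem.List.pyGetD st.1 i 0) 10 == 0 then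
          let temp := PySem.List.pyGetD st.1 i 0
          let a' := (PySem.List.pyRange i st.2 1).foldl
            (fun a j => PySem.List.pySetD a j (PySem.List.pyGetD a (j + 1) 0)) st.1
          (PySem.List.pySetD a' st.2 temp, st.2 - 1)
        else st)
      (pre ++ NM ++ M, (pre.length : Int) + (NM.length : Int) - 1)
    = (pre.filter (fun x => !(PySem.Int.mod x 10 == 0)) ++ NM
        ++ pre.filter (fun x => PySem.Int.mod x 10 == 0) ++ M,
       ((pre.filter (fun x => !(PySem.Int.mod x 10 == 0))).length : Int) + (NM.length : Int) - 1) := by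
  induction pre using List.reverseRecOn with
  | nil =>
    intro NM M
    rw [show ((([] : List Int).length : Int) - 1) = (-1 : Int) by simp,
      PySem.List.pyRange_neg_one_eq_nil (by omega)]
    simp
  | append_singleton pre x ih =>
    intro NM M
    have hlen : (((pre ++ [x]).length : Int) - 1) = (pre.length : Int) := by simp
    rw [hlen, PySem.List.pyRange_neg_one_cons (by omega)]
    simp only [List.foldl_cons]
    have hget : PySem.List.pyGetD ((pre ++ [x]) ++ NM ++ M) ((pre.length : Int)) 0 = x := by
      rw [PySem.List.pyGetD_natCast]
      have := pv_getD_append_len pre x ([x] ++ NM ++ M).tail 0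
      simpa using this
    by_cases hx : PySem.Int.mod x 10 == 0
    · rw [if_pos (by rw [hget]; exact hx)]
      simp only [hget]
      obtain ⟨z, hz⟩ := pv_inner NM pre x M
      have hz' : (PySem.List.pyRange ((pre.length : Int))
            (((pre ++ [x]).length : Int) + (NM.length : Int) - 1) 1).foldl
          (fun a j => PySem.List.pySetD a j (PySem.List.pyGetD a (j + 1) 0))
          ((pre ++ [x]) ++ NM ++ M) = pre ++ NM ++ z :: M := by
        rw [show (((pre ++ [x]).length : Int) + (NM.length : Int) - 1)
            = (pre.length : Int) + (NM.length : Int) by simp; omega]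
        rw [show (pre ++ [x]) ++ NM ++ M = pre ++ x :: (NM ++ M) by simp]
        exact hz
      rw [hz']
      have hset : PySem.List.pySetD (pre ++ NM ++ z :: M)
          (((pre ++ [x]).length : Int) + (NM.length : Int) - 1) x
          = (pre ++ NM) ++ x :: M := by
        rw [show (((pre ++ [x]).length : Int) + (NM.length : Int) - 1)
            = (((pre ++ NM).length : Nat) : Int) by simp; omega]
        rw [PySem.List.pySetD_natCast]
        have := pv_set_append_len (pre ++ NM) z M x
        simpa using this
      rw [hset]
      rw [show (pre ++ NM) ++ x :: M = pre ++ NM ++ (x :: M) by simp,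
        show (((pre ++ [x]).length : Int) + (NM.length : Int) - 1 - 1)
          = (pre.length : Int) + (NM.length : Int) - 1 by simp; omega]
      rw [ih NM (x :: M)]
      have hf1 : (pre ++ [x]).filter (fun x => !(PySem.Int.mod x 10 == 0))
          = pre.filter (fun x => !(PySem.Int.mod x 10 == 0)) := by
        rw [List.filter_append]
        simp only [List.filter_cons, hx, Bool.not_true, List.filter_nil]
        simp
      have hf2 : (pre ++ [x]).filter (fun x => PySem.Int.mod x 10 == 0)
          = pre.filter (fun x => PySem.Int.mod x 10 == 0) ++ [x] := by
        rw [List.filter_append]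
        simp only [List.filter_cons, hx, List.filter_nil]
        simp
      rw [hf1, hf2]
      simp
    · rw [if_neg (by rw [hget]; exact hx)]
      rw [show (pre ++ [x]) ++ NM ++ M = pre ++ (x :: NM) ++ M by simp,
        show (((pre ++ [x]).length : Int) + (NM.length : Int) - 1)
          = (pre.length : Int) + (((x :: NM).length : Nat) : Int) - 1 by simp; omega]
      rw [ih (x :: NM) M]
      have hf1 : (pre ++ [x]).filter (fun x => !(PySem.Int.mod x 10 == 0))
          = pre.filter (fun x => !(PySem.Int.mod x 10 == 0)) ++ [x] := by
        rw [List.filter_append]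
        simp only [List.filter_cons, hx, Bool.not_false, List.filter_nil]
        simp [hx]
      have hf2 : (pre ++ [x]).filter (fun x => PySem.Int.mod x 10 == 0)
          = pre.filter (fun x => PySem.Int.mod x 10 == 0) := by
        rw [List.filter_append]
        simp only [List.filter_cons, hx, List.filter_nil]
        simp [hx]
      rw [hf1, hf2]
      refine Prod.ext ?_ ?_ <;> simp <;> omega

-- B's fold collects the two filters
theorem pv_alt_fold (arr : List Int) : ∀ (r t : List Int),
    arr.foldl
      (fun (st : List Int × List Int) x =>
        if PySem.Int.mod x 10 == 0 then (st.1, st.2 ++ [x]) else (st.1 ++ [x], st.2))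
      (r, t)
    = (r ++ arr.filter (fun x => !(PySem.Int.mod x 10 == 0)),
       t ++ arr.filter (fun x => PySem.Int.mod x 10 == 0)) := by
  induction arr with
  | nil => intro r t; simp
  | cons x arr ih =>
    intro r t
    rw [List.foldl_cons]
    by_cases hx : PySem.Int.mod x 10 == 0
    · rw [if_pos hx, ih]
      simp only [List.filter_cons, hx, Bool.not_true, List.filter_nil]
      simp
    · rw [if_neg hx, ih]
      simp only [List.filter_cons, hx, Bool.not_false, List.filter_nil]
      simp [hx]

-- ===== VERDICT (by name: the statement is the Claim_ definition above) =====
theorem push10_multiples_spec : Claim_equal_push10_multiples := by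
  intro arr _
  unfold Spec_push10_multiples push10_multiples push10_multiples_alt
  have h := pv_outer arr [] []
  simp only [List.length_nil, Nat.cast_zero, add_zero, List.append_nil] at h
  simp only [h, pv_alt_fold arr [] []]
  simp
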